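-- pv_equiv track=rewrite | github.com/lzw150/DIA-BERT | src/utils/win_id_utils.py | split_win_id_list
-- ===== SOURCE A (Python) =====
-- def split_win_id_list(pmt_win_id_list, step=10):
--     win_id_pos_arr = []
--     start_pos = 0
--     end_pos = 0
--     start_val = pmt_win_id_list[start_pos]
--     for i in range(len(pmt_win_id_list)):
--         end_pos = i
--         if pmt_win_id_list[i] > start_val + step:
--             win_id_pos_arr.append([start_pos, end_pos])
--             start_pos = end_pos
--             start_val = pmt_win_id_list[start_pos]
--     win_id_pos_arr.append([start_pos, end_pos + 1])
--     return win_id_pos_arr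
-- ===== SOURCE B (Python) =====
-- def split_win_id_list(pmt_win_id_list, step=10):
--     # Recursive decomposition: find the first index breaching the current
--     # segment anchor's threshold, emit the segment, recurse on the rest.
--     n = len(pmt_win_id_list)
--     def go(start, frm):
--         limit = pmt_win_id_list[start] + step
--         j = next((k for k in range(frm, n) if pmt_win_id_list[k] > limit), n)
--         if j == n:
--             return [[start, n]]
--         return [[start, j]] + go(j, j + 1)
--     return go(0, 0)
-- ===== Notes on version B (the rewrite author's own statement) =====
-- stated objective: alternative
-- what changed: B is a recursive decomposition: each segment is obtained by searching for the first index exceeding the anchor's threshold (an inner first-match search) and then recursing on the remainder, instead of A's single flat loop mutating start/end/value state.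
import Mathlib
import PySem

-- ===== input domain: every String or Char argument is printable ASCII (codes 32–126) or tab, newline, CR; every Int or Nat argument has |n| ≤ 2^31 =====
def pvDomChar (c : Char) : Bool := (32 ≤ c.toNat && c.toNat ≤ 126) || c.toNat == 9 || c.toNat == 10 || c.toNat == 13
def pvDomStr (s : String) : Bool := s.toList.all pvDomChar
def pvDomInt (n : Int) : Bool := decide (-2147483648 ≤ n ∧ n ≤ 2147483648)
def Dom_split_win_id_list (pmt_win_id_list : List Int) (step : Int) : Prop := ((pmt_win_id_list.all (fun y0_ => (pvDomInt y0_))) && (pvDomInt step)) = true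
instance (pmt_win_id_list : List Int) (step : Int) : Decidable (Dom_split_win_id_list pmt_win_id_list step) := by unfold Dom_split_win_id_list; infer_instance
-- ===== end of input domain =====

-- B restructures A's flat stateful loop into a recursive segmentation: find the first
-- breaching index, emit a segment, recurse on the rest (same O(n) cost; alternative form).
-- Equivalence is proved on non-empty lists (A raises IndexError on []).

-- ===== PORT A =====
-- the for-loop of A: state (win_id_pos_arr, start_pos, end_pos, start_val), one step per index i
def loopA (l : List Int) (step : Int) : List Int → List (List Int) × Int × Int × Int → List (List Int) × Int × Int × Int
  | [], st => st
  | i :: rest, (arr, sp, _ep, sv) =>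
      if PySem.List.pyGetD l i 0 > sv + step then
        loopA l step rest (arr ++ [[sp, i]], i, i, PySem.List.pyGetD l i 0)
      else
        loopA l step rest (arr, sp, i, sv)

def split_win_id_list (pmt_win_id_list : List Int) (step : Int) : List (List Int) :=
  match pmt_win_id_list with
  | [] => []  -- Python: pmt_win_id_list[0] raises IndexError; excluded by Pre_
  | v0 :: _ =>
      let st := loopA pmt_win_id_list step (PySem.List.pyRange 0 (pmt_win_id_list.length : Int) 1) ([], 0, 0, v0)
      st.1 ++ [[st.2.1, st.2.2.1 + 1]]

-- ===== PORT B =====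
-- next((k for k in range(frm, n) if pmt_win_id_list[k] > limit), n)
def findBreach (l : List Int) (limit : Int) : List Int → Int → Int
  | [], n => n
  | k :: rest, n => if PySem.List.pyGetD l k 0 > limit then k else findBreach l limit rest n

-- def go(start, frm), fuel is a totality guard only (the call depth is ≤ n + 1)
def goB (l : List Int) (step : Int) (n : Int) : Nat → Int → Int → List (List Int)
  | 0, start, _frm => [[start, n]]  -- never reached with fuel = n + 1
  | fuel + 1, start, frm =>
      let limit := PySem.List.pyGetD l start 0 + step
      let j := findBreach l limit (PySem.List.pyRange frm n 1) n
      if j = n then [[start, n]]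
      else [[start, j]] ++ goB l step n fuel j (j + 1)

def split_win_id_list_alt (pmt_win_id_list : List Int) (step : Int) : List (List Int) :=
  match pmt_win_id_list with
  | [] => []  -- Python: pmt_win_id_list[0] raises IndexError; excluded by Pre_
  | _ :: _ => goB pmt_win_id_list step (pmt_win_id_list.length : Int) (pmt_win_id_list.length + 1) 0 0

-- ===== PRECONDITION & SPEC =====
-- Pre_ excludes only the empty list, on which A raises IndexError (pmt_win_id_list[0]).
def Pre_split_win_id_list (pmt_win_id_list : List Int) (step : Int) : Prop :=
  pmt_win_id_list ≠ []
instance (pmt_win_id_list : List Int) (step : Int) : Decidable (Pre_split_win_id_list pmt_win_id_list step) := by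
  unfold Pre_split_win_id_list; infer_instance

def pvWitness_split_win_id_list : List Int × Int := ([1, 2, 3, 15, 16, 40], 10)

def Spec_split_win_id_list (pmt_win_id_list : List Int) (step : Int) (out : List (List Int)) : Prop := out = split_win_id_list_alt pmt_win_id_list step
instance (pmt_win_id_list : List Int) (step : Int) (out : List (List Int)) : Decidable (Spec_split_win_id_list pmt_win_id_list step out) := by unfold Spec_split_win_id_list; infer_instance

-- ===== CLAIM (what is proved, stated in full; the proofs are below) =====
def Claim_equal_split_win_id_list : Prop := ∀ (pmt_win_id_list : List Int) (step : Int), Dom_split_win_id_list pmt_win_id_list step → Pre_split_win_id_list pmt_win_id_list step → Spec_split_win_id_list pmt_win_id_list step (split_win_id_list pmt_win_id_list step)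

-- ===== LEMMAS AND PROOFS =====

-- main correspondence: running A's loop over range(frm, n) from a well-formed state and
-- appending the final pair equals arr ++ the recursive segmentation goB from (sp, frm)
theorem loopA_eq_goB (l : List Int) (step n : Int) :
    ∀ (k fuel : Nat) (sp ep frm : Int) (arr : List (List Int)),
      (n - frm).toNat = k → frm ≤ n → (ep + 1 = frm ∨ frm < n) → k < fuel →
      (let st := loopA l step (PySem.List.pyRange frm n 1) (arr, sp, ep, PySem.List.pyGetD l sp 0);
       st.1 ++ [[st.2.1, st.2.2.1 + 1]]) = arr ++ goB l step n fuel sp frm := by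
  intro k
  induction k using Nat.strong_induction_on with
  | _ k ih =>
    intro fuel sp ep frm arr hk hle hep hfuel
    obtain ⟨f, rfl⟩ : ∃ f, fuel = f + 1 := ⟨fuel - 1, by omega⟩
    by_cases hlt : frm < n
    · rw [PySem.List.pyRange_one_cons hlt]
      by_cases hbr : PySem.List.pyGetD l frm 0 > PySem.List.pyGetD l sp 0 + step
      · -- breach at frm: A fires, B cuts here and recurses
        have hk' : (n - (frm + 1)).toNat < k := by omega
        have hIH := ih _ hk' f frm frm (frm + 1) (arr ++ [[sp, frm]]) rfl (by omega)
          (Or.inl rfl) (by omega)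
        simp only [loopA, if_pos hbr] at *
        rw [hIH]
        have hB : goB l step n (f + 1) sp frm
            = [[sp, frm]] ++ goB l step n f frm (frm + 1) := by
          rw [goB]
          simp only [PySem.List.pyRange_one_cons hlt, findBreach, if_pos hbr]
          rw [if_neg (show ¬ frm = n by omega)]
        rw [hB, List.append_assoc]
      · -- no breach at frm: both sides skip index frm
        have hk' : (n - (frm + 1)).toNat < k := by omega
        have hIH := ih _ hk' (f + 1) sp frm (frm + 1) arr rfl (by omega)
          (Or.inl rfl) (by omega)
        simp only [loopA, if_neg hbr] at *
        rw [hIH]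
        have hB : goB l step n (f + 1) sp frm = goB l step n (f + 1) sp (frm + 1) := by
          simp [goB, findBreach, PySem.List.pyRange_one_cons hlt, hbr]
        rw [hB]
    · -- range empty: frm = n
      have hfn : frm = n := le_antisymm hle (not_lt.mp hlt)
      have hep' : ep + 1 = n := by rcases hep with h | h; omega; omega
      rw [PySem.List.pyRange_one_eq_nil (by omega)]
      simp [loopA, goB, findBreach, PySem.List.pyRange_one_eq_nil (le_of_eq hfn.symm), hep']

-- ===== VERDICT (by name: the statement is the Claim_ definition above) =====
theorem split_win_id_list_spec : Claim_equal_split_win_id_list := by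
  intro l step _hdom hpre
  unfold Spec_split_win_id_list
  cases l with
  | nil => exact absurd rfl hpre
  | cons v0 t =>
      have h0 : v0 = PySem.List.pyGetD (v0 :: t) 0 0 := by
        simp [PySem.List.pyGetD, PySem.List.pyGet?, PySem.List.pyIdx?]
      have hmain := loopA_eq_goB (v0 :: t) step ((v0 :: t).length : Int)
        (((v0 :: t).length : Int)).toNat ((v0 :: t).length + 1) 0 0 0 []
        (by omega) (by positivity) (Or.inr (by simp)) (by simp)
      simpa [split_win_id_list, split_win_id_list_alt, ← h0] using hmain
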